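-- pv_equiv track=rewrite | github.com/ddespairrr/textgen | make_model.py | get_bigramms
-- ===== SOURCE A (Python) =====
-- def get_bigramms(tokens):
--     t0 = '#'
--     for t1 in tokens:
--         yield t0, t1
--         if t1 in '.?!':
--             yield t1, '#'
--             t0, t1 = '#', '#'
--         else:
--             t0 = t1
-- ===== SOURCE B (Python) =====
-- from itertools import pairwise
--
-- def get_bigramms(tokens):
--     def augmented():
--         yield '#'
--         for t in tokens:
--             yield t
--             if t in '.?!':
--                 yield '#'
--     yield from pairwise(augmented())
-- ===== Notes on version B (the rewrite author's own statement) =====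
-- stated objective: idiomatic
-- what changed: B replaces A's hand-carried previous-token state variable with an augmented token stream ('#' prepended and re-inserted after each sentence ender) whose adjacent pairs are taken with itertools.pairwise.
import Mathlib
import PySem

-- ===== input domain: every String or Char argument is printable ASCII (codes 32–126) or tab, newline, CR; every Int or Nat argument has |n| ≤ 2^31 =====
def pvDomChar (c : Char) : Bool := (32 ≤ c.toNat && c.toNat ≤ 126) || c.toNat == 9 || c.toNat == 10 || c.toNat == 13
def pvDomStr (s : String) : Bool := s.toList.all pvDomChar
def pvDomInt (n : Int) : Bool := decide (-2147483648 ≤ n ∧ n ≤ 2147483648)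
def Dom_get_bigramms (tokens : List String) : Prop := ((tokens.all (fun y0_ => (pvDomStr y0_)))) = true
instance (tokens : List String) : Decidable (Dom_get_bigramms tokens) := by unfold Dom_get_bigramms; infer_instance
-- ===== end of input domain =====

-- ===== PORT A =====
-- B replaces A's carried previous-token state with an augmented '#'-sentinel stream paired by pairwise (idiomatic decomposition).
-- t1 in '.?!' (Python substring test)
def enderA (t : String) : Bool := PySem.Str.isIn t ".?!"

def goA (t0 : String) : List String → List (String × String)
  | [] => []
  | t1 :: ts =>
    if enderA t1 then (t0, t1) :: (t1, "#") :: goA "#" ts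
    else (t0, t1) :: goA t1 ts

def get_bigramms (tokens : List String) : List (String × String) := goA "#" tokens

-- ===== PORT B =====
def enderB (t : String) : Bool := PySem.Str.isIn t ".?!"

-- the augmented() generator: '#', then each token, with '#' after each sentence ender
def augmentedB (tokens : List String) : List String :=
  "#" :: tokens.flatMap (fun t => if enderB t then [t, "#"] else [t])

-- itertools.pairwise
def pairwiseB {α : Type} (xs : List α) : List (α × α) := xs.zip xs.tail

def get_bigramms_alt (tokens : List String) : List (String × String) :=
  pairwiseB (augmentedB tokens)

-- ===== PRECONDITION & SPEC =====
def Spec_get_bigramms (tokens : List String) (out : List (String × String)) : Prop := out = get_bigramms_alt tokens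
instance (tokens : List String) (out : List (String × String)) : Decidable (Spec_get_bigramms tokens out) := by unfold Spec_get_bigramms; infer_instance

-- ===== CLAIM (what is proved, stated in full; the proofs are below) =====
def Claim_equal_get_bigramms : Prop := ∀ (tokens : List String), Dom_get_bigramms tokens → Spec_get_bigramms tokens (get_bigramms tokens)

-- ===== LEMMAS AND PROOFS =====
theorem goA_eq_pairwise (tokens : List String) (t0 : String) :
    goA t0 tokens = pairwiseB (t0 :: tokens.flatMap (fun t => if enderB t then [t, "#"] else [t])) := by
  induction tokens generalizing t0 with
  | nil => rfl
  | cons t ts ih =>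
    have hb : enderB t = enderA t := rfl
    by_cases h : enderA t = true
    · simp only [goA, h, if_pos, hb, List.flatMap_cons, List.cons_append, pairwiseB,
        List.zip_cons_cons, List.tail_cons, List.nil_append, ih "#"]
    · simp only [goA, hb, h, Bool.false_eq_true, if_false, List.flatMap_cons,
        List.singleton_append, pairwiseB, List.zip_cons_cons, List.tail_cons, ih t]

-- ===== VERDICT (by name: the statement is the Claim_ definition above) =====
theorem get_bigramms_spec : Claim_equal_get_bigramms := by
  intro tokens _
  unfold Spec_get_bigramms get_bigramms get_bigramms_alt augmentedB
  exact goA_eq_pairwise tokens "#"
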